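-- pv_equiv track=rewrite | github.com/xzt0001/ProSquare-SQL | src/engine/sql_parser.py | _find_unbalanced_parenthesis
-- ===== SOURCE A (Python) =====
-- def _find_unbalanced_parenthesis(query):
--     """Find the position of an unbalanced parenthesis."""
--     stack = []
--     for i, char in enumerate(query):
--         if char == '(':
--             stack.append(i)
--         elif char == ')':
--             if not stack:
--                 return i  # Closing parenthesis without an opening one
--             stack.pop()
--
--     # If we still have items in the stack, we have unclosed parentheses
--     return stack[0] if stack else 0
-- ===== SOURCE B (Python) =====
-- def _find_unbalanced_parenthesis(query):
--     """Find the position of an unbalanced parenthesis by pair cancellation.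
--
--     Filter the query down to its parenthesis tokens (index, char), then
--     repeatedly sweep the token list deleting every adjacent '(' ')' pair
--     until no pair remains.  The survivors are exactly the unbalanced
--     parentheses, in the form ')'* '('*; the answer is the index of the
--     first survivor (0 if the string is balanced).
--     """
--     parens = [(i, c) for i, c in enumerate(query) if c in '()']
--     changed = True
--     while changed:
--         changed = False
--         out = []
--         k = 0
--         while k < len(parens):
--             if k + 1 < len(parens) and parens[k][1] == '(' and parens[k + 1][1] == ')':
--                 k += 2
--                 changed = True
--             else:
--                 out.append(parens[k])
--                 k += 1
--         parens = out
--     return parens[0][0] if parens else 0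
-- ===== Notes on version B (the rewrite author's own statement) =====
-- stated objective: alternative
-- what changed: Instead of a one-pass index stack, B filters the string to its parenthesis tokens and repeatedly sweeps that list deleting adjacent '()' pairs until none remain; the answer is the index of the first surviving token (0 if balanced).
import Mathlib
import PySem

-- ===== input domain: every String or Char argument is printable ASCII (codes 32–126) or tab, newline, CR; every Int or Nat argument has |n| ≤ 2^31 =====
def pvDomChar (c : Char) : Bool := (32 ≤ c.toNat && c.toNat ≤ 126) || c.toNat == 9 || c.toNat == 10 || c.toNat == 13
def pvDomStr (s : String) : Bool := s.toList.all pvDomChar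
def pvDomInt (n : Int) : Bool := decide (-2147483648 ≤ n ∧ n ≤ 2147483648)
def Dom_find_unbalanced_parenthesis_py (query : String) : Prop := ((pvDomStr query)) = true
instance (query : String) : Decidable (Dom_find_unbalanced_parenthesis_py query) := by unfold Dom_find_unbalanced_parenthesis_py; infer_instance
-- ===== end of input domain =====

-- B replaces A's one-pass index stack by iterated cancellation: filter the parenthesis
-- tokens, repeatedly delete adjacent '()' pairs until none remain, answer = first survivor
-- (objective: alternative; not faster).

-- ===== PORT A =====
-- stack kept exactly as Python's list: append = ++ [i], pop() = dropLast, stack[0] = head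
def pvALoop : List Char → Int → List Int → Int
  | [], _, stack => match stack with
    | [] => 0
    | s :: _ => s
  | c :: cs, i, stack =>
    if c = '(' then pvALoop cs (i + 1) (stack ++ [i])
    else if c = ')' then
      match stack with
      | [] => i
      | _ :: _ => pvALoop cs (i + 1) stack.dropLast
    else pvALoop cs (i + 1) stack

def find_unbalanced_parenthesis_py (query : String) : Int :=
  pvALoop query.toList 0 []

-- ===== PORT B =====
-- parens = [(i, c) for i, c in enumerate(query) if c in '()']
def pvTokens : List Char → Int → List (Int × Char)
  | [], _ => []
  | c :: cs, i =>
    if c = '(' ∨ c = ')' then (i, c) :: pvTokens cs (i + 1) else pvTokens cs (i + 1)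

-- one sweep of the inner while loop: (surviving tokens, changed flag)
def pvSweep : List (Int × Char) → List (Int × Char) × Bool
  | (_, '(') :: (_, ')') :: rest => ((pvSweep rest).1, true)
  | t :: rest => (t :: (pvSweep rest).1, (pvSweep rest).2)
  | [] => ([], false)

theorem pvSweep_length (l : List (Int × Char)) : (pvSweep l).1.length ≤ l.length := by
  induction l using pvSweep.induct with
  | case1 i j rest ih => rw [pvSweep.eq_1]; simp; omega
  | case2 t rest h ih => rw [pvSweep.eq_2 t rest h]; simp; omega
  | case3 => rw [pvSweep.eq_3]

theorem pvSweep_length_lt (l : List (Int × Char)) :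
    (pvSweep l).2 = true → (pvSweep l).1.length < l.length := by
  induction l using pvSweep.induct with
  | case1 i j rest ih =>
    intro _; rw [pvSweep.eq_1]
    have := pvSweep_length rest; simp; omega
  | case2 t rest h ih =>
    rw [pvSweep.eq_2 t rest h]; intro hb
    have := ih hb; simp; omega
  | case3 => rw [pvSweep.eq_3]; intro hb; simp at hb

-- the outer while loop
def pvReduce (l : List (Int × Char)) : List (Int × Char) :=
  if h : (pvSweep l).2 then pvReduce (pvSweep l).1 else (pvSweep l).1
termination_by l.length
decreasing_by exact pvSweep_length_lt l h

def find_unbalanced_parenthesis_py_alt (query : String) : Int :=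
  match pvReduce (pvTokens query.toList 0) with
  | [] => 0
  | (i, _) :: _ => i

-- ===== PRECONDITION & SPEC =====
def Spec_find_unbalanced_parenthesis_py (query : String) (out : Int) : Prop := out = find_unbalanced_parenthesis_py_alt query
instance (query : String) (out : Int) : Decidable (Spec_find_unbalanced_parenthesis_py query out) := by unfold Spec_find_unbalanced_parenthesis_py; infer_instance

-- ===== CLAIM (what is proved, stated in full; the proofs are below) =====
def Claim_equal_find_unbalanced_parenthesis_py : Prop := ∀ (query : String), Dom_find_unbalanced_parenthesis_py query → Spec_find_unbalanced_parenthesis_py query (find_unbalanced_parenthesis_py query)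

-- ===== LEMMAS AND PROOFS =====

-- Canonical stack-based cancellation (proof device): state is a list with head = top;
-- ')' pops a '(' from the top, everything else is pushed.
def pvStep (st : List (Int × Char)) (t : Int × Char) : List (Int × Char) :=
  match st with
  | p :: st' => if t.2 = ')' ∧ p.2 = '(' then st' else t :: st
  | [] => t :: st

def pvCanon (st : List (Int × Char)) (ts : List (Int × Char)) : List (Int × Char) :=
  ts.foldl pvStep st

def pvIdxLast (l : List (Int × Char)) : Int :=
  match l.getLast? with
  | some (j, _) => j
  | none => 0

theorem pvStep_open (st : List (Int × Char)) (i : Int) :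
    pvStep st (i, '(') = (i, '(') :: st := by
  cases st with
  | nil => rfl
  | cons p st' => simp [pvStep]

theorem pvStep_close_open (st : List (Int × Char)) (i j : Int) :
    pvStep ((j, '(') :: st) (i, ')') = st := by
  simp [pvStep]

theorem canon_sweep (l : List (Int × Char)) :
    ∀ st, pvCanon st (pvSweep l).1 = pvCanon st l := by
  induction l using pvSweep.induct with
  | case1 i j rest ih =>
    intro st; rw [pvSweep.eq_1]
    simp only [pvCanon, List.foldl] at *
    rw [pvStep_open, pvStep_close_open]
    exact ih st
  | case2 t rest h ih =>
    intro st; rw [pvSweep.eq_2 t rest h]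
    simp only [pvCanon, List.foldl] at *
    exact ih (pvStep st t)
  | case3 => intro st; rw [pvSweep.eq_3]

theorem sweep_fix (l : List (Int × Char)) (h : (pvSweep l).2 = false) : (pvSweep l).1 = l := by
  induction l using pvSweep.induct with
  | case1 i j rest ih => rw [pvSweep.eq_1] at h; simp at h
  | case2 t rest hside ih =>
    rw [pvSweep.eq_2 t rest hside] at h ⊢
    simp at h ⊢; exact ih h
  | case3 => rw [pvSweep.eq_3]

theorem canon_reduce (l : List (Int × Char)) :
    ∀ st, pvCanon st (pvReduce l) = pvCanon st l := by
  induction l using pvReduce.induct with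
  | case1 l h ih =>
    intro st; rw [pvReduce, dif_pos h, ih st, canon_sweep]
  | case2 l h =>
    intro st; rw [pvReduce, dif_neg h, canon_sweep]

theorem reduce_irred (l : List (Int × Char)) : (pvSweep (pvReduce l)).2 = false := by
  induction l using pvReduce.induct with
  | case1 l h ih => rw [pvReduce, dif_pos h]; exact ih
  | case2 l h =>
    rw [pvReduce, dif_neg h]
    have hf : (pvSweep l).2 = false := by simpa using h
    rw [sweep_fix l hf]; exact hf

def pvIsParen (t : Int × Char) : Prop := t.2 = '(' ∨ t.2 = ')'

theorem sweep_sublist (l : List (Int × Char)) : ∀ t ∈ (pvSweep l).1, t ∈ l := by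
  induction l using pvSweep.induct with
  | case1 i j rest ih =>
    intro t ht; rw [pvSweep.eq_1] at ht
    simp only [List.mem_cons]; exact Or.inr (Or.inr (ih t ht))
  | case2 u rest h ih =>
    intro t ht; rw [pvSweep.eq_2 u rest h] at ht
    simp only [List.mem_cons] at ht ⊢
    cases ht with
    | inl h' => exact Or.inl h'
    | inr h' => exact Or.inr (ih t h')
  | case3 => intro t ht; rw [pvSweep.eq_3] at ht; simp at ht

theorem reduce_mem (l : List (Int × Char)) : ∀ t ∈ pvReduce l, t ∈ l := by
  induction l using pvReduce.induct with
  | case1 l h ih =>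
    intro t ht; rw [pvReduce, dif_pos h] at ht
    exact sweep_sublist l t (ih t ht)
  | case2 l h =>
    intro t ht; rw [pvReduce, dif_neg h] at ht
    exact sweep_sublist l t ht

theorem tokens_paren (cs : List Char) : ∀ i, ∀ t ∈ pvTokens cs i, pvIsParen t := by
  induction cs with
  | nil => intro i t ht; simp [pvTokens] at ht
  | cons c cs ih =>
    intro i t ht
    by_cases hc : c = '(' ∨ c = ')'
    · rw [pvTokens, if_pos hc] at ht
      rcases List.mem_cons.mp ht with h' | h'
      · subst h'; exact hc
      · exact ih (i + 1) t h'
    · rw [pvTokens, if_neg hc] at ht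
      exact ih (i + 1) t ht

-- an irreducible all-paren list has the form ')'* '('*
theorem irred_shape (l : List (Int × Char)) (hp : ∀ t ∈ l, pvIsParen t)
    (h : (pvSweep l).2 = false) :
    ∃ cls opn, l = cls ++ opn ∧ (∀ t ∈ cls, t.2 = ')') ∧ (∀ t ∈ opn, t.2 = '(') := by
  induction l with
  | nil => exact ⟨[], [], rfl, by simp, by simp⟩
  | cons t rest ih =>
    obtain ⟨i, c⟩ := t
    have hc : c = '(' ∨ c = ')' := hp (i, c) (by simp)
    cases hc with
    | inr hcr =>
      subst hcr
      have hside : ∀ (f g : Int) (r : List (Int × Char)),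
          ((i, ')') : Int × Char) = (f, '(') → rest = (g, ')') :: r → False := by
        intro f g r he _; simp at he
      rw [pvSweep.eq_2 _ rest hside] at h
      simp only at h
      obtain ⟨cls, opn, hre, hcls, hopn⟩ :=
        ih (fun t ht => hp t (List.mem_cons_of_mem _ ht)) h
      exact ⟨(i, ')') :: cls, opn, by simp [hre], by
        intro t ht; rcases List.mem_cons.mp ht with h' | h'
        · subst h'; rfl
        · exact hcls t h', hopn⟩
    | inl hcl =>
      subst hcl
      cases rest with
      | nil =>
        exact ⟨[], [(i, '(')], rfl, by simp, by intro t ht; simp at ht; subst ht; rfl⟩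
      | cons u r =>
        obtain ⟨j, d⟩ := u
        have hd : d = '(' ∨ d = ')' := (hp (j, d) (by simp)).imp id id
        cases hd with
        | inr hdr =>
          subst hdr; rw [pvSweep.eq_1] at h; simp at h
        | inl hdl =>
          subst hdl
          have hside : ∀ (f g : Int) (r' : List (Int × Char)),
              ((i, '(') : Int × Char) = (f, '(') → (j, '(') :: r = (g, ')') :: r' → False := by
            intro f g r' _ he; simp at he
          rw [pvSweep.eq_2 _ _ hside] at h
          simp only at h
          obtain ⟨cls, opn, hre, hcls, hopn⟩ :=
            ih (fun t ht => hp t (List.mem_cons_of_mem _ ht)) h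
          have hclsnil : cls = [] := by
            cases hcls' : cls with
            | nil => rfl
            | cons c0 cl' =>
              rw [hcls'] at hre
              have : c0 = (j, '(') := by
                have := congrArg List.head? hre; simpa using this.symm
              have h1 : c0.2 = ')' := hcls c0 (by simp [hcls'])
              rw [this] at h1; simp at h1
          subst hclsnil
          simp only [List.nil_append] at hre
          refine ⟨[], (i, '(') :: opn, by simp [hre], by simp, ?_⟩
          intro t ht; rcases List.mem_cons.mp ht with h' | h'
          · subst h'; rfl
          · exact hopn t h'

theorem canon_closes (cls : List (Int × Char)) :
    ∀ st, (∀ t ∈ cls, t.2 = ')') → (∀ t ∈ st, t.2 = ')') →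
      pvCanon st cls = cls.reverse ++ st := by
  induction cls with
  | nil => intro st _ _; simp [pvCanon]
  | cons t cls ih =>
    intro st hc hst
    have ht : t.2 = ')' := hc t (by simp)
    have hstep : pvStep st t = t :: st := by
      cases st with
      | nil => rfl
      | cons p st' =>
        have hp : p.2 = ')' := hst p (by simp)
        simp [pvStep, hp]
    simp only [pvCanon, List.foldl, hstep]
    have hrec := ih (t :: st) (fun u hu => hc u (List.mem_cons_of_mem _ hu))
      (by intro u hu; rcases List.mem_cons.mp hu with h' | h'
          · subst h'; exact ht
          · exact hst u h')
    simp only [pvCanon] at hrec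
    rw [hrec]; simp

theorem canon_opens (opn : List (Int × Char)) :
    ∀ st, (∀ t ∈ opn, t.2 = '(') → pvCanon st opn = opn.reverse ++ st := by
  induction opn with
  | nil => intro st _; simp [pvCanon]
  | cons t opn ih =>
    intro st ho
    have ht : t.2 = '(' := ho t (by simp)
    have hstep : pvStep st t = t :: st := by
      cases st with
      | nil => rfl
      | cons p st' => simp [pvStep, ht]
    simp only [pvCanon, List.foldl, hstep]
    have hrec := ih (t :: st) (fun u hu => ho u (List.mem_cons_of_mem _ hu))
    simp only [pvCanon] at hrec
    rw [hrec]; simp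

theorem canon_irred (l : List (Int × Char)) (hp : ∀ t ∈ l, pvIsParen t)
    (h : (pvSweep l).2 = false) : pvCanon [] l = l.reverse := by
  obtain ⟨cls, opn, hre, hcls, hopn⟩ := irred_shape l hp h
  subst hre
  simp only [pvCanon, List.foldl_append]
  have h1 : List.foldl pvStep [] cls = cls.reverse := by
    have := canon_closes cls [] hcls (by simp)
    simpa [pvCanon] using this
  rw [h1]
  have h2 := canon_opens opn cls.reverse hopn
  simp only [pvCanon] at h2
  rw [h2]; simp

-- bottom persistence: a ')' at the bottom of the state never leaves
theorem canon_bottom (ts : List (Int × Char)) :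
    ∀ st x, x.2 = ')' → ∃ st', pvCanon (st ++ [x]) ts = st' ++ [x] := by
  induction ts with
  | nil => intro st x _; exact ⟨st, rfl⟩
  | cons t ts ih =>
    intro st x hx
    have hstep : ∃ st2, pvStep (st ++ [x]) t = st2 ++ [x] := by
      cases st with
      | nil =>
        simp only [List.nil_append, pvStep]
        by_cases h : t.2 = ')' ∧ x.2 = '('
        · rw [h.2] at hx; simp at hx
        · rw [if_neg h]; exact ⟨[t], rfl⟩
      | cons p st' =>
        simp only [List.cons_append, pvStep]
        by_cases h : t.2 = ')' ∧ p.2 = '('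
        · rw [if_pos h]; exact ⟨st', rfl⟩
        · rw [if_neg h]; exact ⟨t :: p :: st', rfl⟩
    obtain ⟨st2, h2⟩ := hstep
    obtain ⟨st', h'⟩ := ih st2 x hx
    exact ⟨st', by simp only [pvCanon, List.foldl, h2]; exact h'⟩

-- A's loop computes the index of the last element of the canonical state
theorem aloop_canon (cs : List Char) :
    ∀ i st, (∀ t ∈ st, t.2 = '(') →
      pvALoop cs i ((st.map Prod.fst).reverse) = pvIdxLast (pvCanon st (pvTokens cs i)) := by
  induction cs with
  | nil =>
    intro i st _
    simp only [pvTokens, pvCanon, List.foldl]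
    cases hst : st.getLast? with
    | none =>
      have hnil : st = [] := List.getLast?_eq_none_iff.mp hst
      subst hnil; simp [pvALoop, pvIdxLast]
    | some t =>
      obtain ⟨j, c⟩ := t
      have hmap : (st.map Prod.fst).getLast? = some j := by
        rw [List.getLast?_map, hst]; rfl
      have hhead : ((st.map Prod.fst).reverse).head? = some j := by
        rw [List.head?_reverse]; exact hmap
      cases hrev : (st.map Prod.fst).reverse with
      | nil => rw [hrev] at hhead; simp at hhead
      | cons s tl =>
        rw [hrev] at hhead; simp at hhead
        simp [pvALoop, pvIdxLast, hst, hhead]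
  | cons c cs ih =>
    intro i st hst
    by_cases hc : c = '('
    · subst hc
      have htok : pvTokens ('(' :: cs) i = (i, '(') :: pvTokens cs (i + 1) := by
        rw [pvTokens, if_pos (Or.inl rfl)]
      rw [htok]
      simp only [pvCanon, List.foldl, pvStep_open]
      have harg : (st.map Prod.fst).reverse ++ [i]
          = (((i, '(') :: st).map Prod.fst).reverse := by simp
      simp only [pvALoop, ite_true]
      rw [harg]
      exact ih (i + 1) ((i, '(') :: st)
        (by intro t ht; rcases List.mem_cons.mp ht with h' | h'
            · subst h'; rfl
            · exact hst t h')
    · by_cases hc2 : c = ')'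
      · subst hc2
        have htok : pvTokens (')' :: cs) i = (i, ')') :: pvTokens cs (i + 1) := by
          rw [pvTokens, if_pos (Or.inr rfl)]
        rw [htok]
        cases st with
        | nil =>
          simp only [List.map_nil, List.reverse_nil]
          rw [pvALoop]
          simp only [reduceIte, Char.reduceEq]
          have hstep : pvStep [] (i, ')') = [(i, ')')] := rfl
          simp only [pvCanon, List.foldl, hstep]
          obtain ⟨st', h'⟩ := canon_bottom (pvTokens cs (i + 1)) [] (i, ')') rfl
          simp only [List.nil_append] at h'
          simp only [pvCanon] at h'
          rw [h']
          simp [pvIdxLast]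
        | cons p st' =>
          have hp : p.2 = '(' := hst p (by simp)
          have hstep : pvStep (p :: st') (i, ')') = st' := by simp [pvStep, hp]
          simp only [pvCanon, List.foldl, hstep]
          have hstack : ((p :: st').map Prod.fst).reverse
              = (st'.map Prod.fst).reverse ++ [p.1] := by simp
          rw [hstack]
          cases hq : (st'.map Prod.fst).reverse ++ [p.1] with
          | nil => simp at hq
          | cons q qs =>
            rw [pvALoop]
            simp only [Char.reduceEq, reduceIte]
            have hdrop : (q :: qs).dropLast = (st'.map Prod.fst).reverse := by
              rw [← hq]; exact List.dropLast_concat ..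
            rw [hdrop]
            exact ih (i + 1) st' (fun t ht => hst t (List.mem_cons_of_mem _ ht))
      · have htok : pvTokens (c :: cs) i = pvTokens cs (i + 1) := by
          rw [pvTokens, if_neg (by tauto)]
        rw [htok]
        simp only [pvALoop]
        rw [if_neg hc, if_neg hc2]
        exact ih (i + 1) st hst

-- ===== VERDICT (by name: the statement is the Claim_ definition above) =====
theorem find_unbalanced_parenthesis_py_spec : Claim_equal_find_unbalanced_parenthesis_py := by
  intro query _
  unfold Spec_find_unbalanced_parenthesis_py find_unbalanced_parenthesis_py find_unbalanced_parenthesis_py_alt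
  have hA := aloop_canon query.toList 0 [] (by simp)
  simp only [List.map_nil, List.reverse_nil] at hA
  rw [hA]
  set l := pvTokens query.toList 0 with hl
  have hp : ∀ t ∈ l, pvIsParen t := tokens_paren query.toList 0
  have hpr : ∀ t ∈ pvReduce l, pvIsParen t := fun t ht => hp t (reduce_mem l t ht)
  have h1 : pvCanon [] (pvReduce l) = (pvReduce l).reverse :=
    canon_irred _ hpr (reduce_irred l)
  have h2 : pvCanon [] (pvReduce l) = pvCanon [] l := canon_reduce l []
  have h3 : (pvReduce l).reverse = pvCanon [] l := by rw [← h1, h2]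
  have h4 : pvReduce l = (pvCanon [] l).reverse := by
    rw [← h3, List.reverse_reverse]
  rw [h4]
  unfold pvIdxLast
  cases hc : (pvCanon [] l).getLast? with
  | none =>
    have : pvCanon [] l = [] := List.getLast?_eq_none_iff.mp hc
    simp [this]
  | some t =>
    have : (pvCanon [] l).reverse.head? = some t := by
      rw [List.head?_reverse]; exact hc
    cases hrev : (pvCanon [] l).reverse with
    | nil => simp [hrev] at this
    | cons a tl =>
      rw [hrev] at this; simp at this
      cases t; cases a; simp_all
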